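-- pv_equiv track=rewrite | github.com/miliar/Code_Jam_Webscraper | solutions_python/Problem_55/195.py | income
-- ===== SOURCE A (Python) =====
-- def income(r,k,n,groups):
--     money = 0
--     index = 0
--     for i in range(r):
--         p = groups[index]
--         c = 1
--         while p + groups[(index+1)%n] <= k and c < n:
--             p = p + groups[(index+1)%n]
--             index = (index+1)%n
--             c = c + 1
--
--         index = (index+1)%n
--         money = money + p
--
--     return str(money)
-- ===== SOURCE B (Python) =====
-- def income(r, k, n, groups):
--     # Lazy memoized simulation with cycle detection: each ride's outcome depends only
--     # on its start index, so record (earnings, next start) per start index on first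
--     # visit, find the cycle of start indices, and batch the r rides in closed form.
--     if r <= 0:
--         return "0"
--     first = [None] * n
--     pref = [0]
--     cur = 0
--     while first[cur] is None and len(pref) - 1 < r:
--         first[cur] = len(pref) - 1
--         p = groups[cur]
--         c = 1
--         i = cur
--         while p + groups[(i + 1) % n] <= k and c < n:
--             i = (i + 1) % n
--             p = p + groups[i]
--             c = c + 1
--         pref.append(pref[-1] + p)
--         cur = (i + 1) % n
--     L = len(pref) - 1
--     if r <= L:
--         return str(pref[r])
--     t = first[cur]
--     cl = L - t
--     cyc = pref[L] - pref[t]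
--     q, m = divmod(r - t, cl)
--     return str(q * cyc + pref[t + m])
-- ===== Notes on version B (the rewrite author's own statement) =====
-- stated objective: faster
-- what changed: B replaces A's ride-by-ride simulation of all r rounds by memoizing each start index's (earnings, next start) on first visit, detecting the cycle of start indices, and summing the r rounds in closed form over the cycle.
-- outside the precondition, e.g. on income(1, 0, 3, [5, 1]): A returns '5', B returns '5'; on income(1, 100, -1, [5]): A returns '5', B raises IndexError
import Mathlib
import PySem

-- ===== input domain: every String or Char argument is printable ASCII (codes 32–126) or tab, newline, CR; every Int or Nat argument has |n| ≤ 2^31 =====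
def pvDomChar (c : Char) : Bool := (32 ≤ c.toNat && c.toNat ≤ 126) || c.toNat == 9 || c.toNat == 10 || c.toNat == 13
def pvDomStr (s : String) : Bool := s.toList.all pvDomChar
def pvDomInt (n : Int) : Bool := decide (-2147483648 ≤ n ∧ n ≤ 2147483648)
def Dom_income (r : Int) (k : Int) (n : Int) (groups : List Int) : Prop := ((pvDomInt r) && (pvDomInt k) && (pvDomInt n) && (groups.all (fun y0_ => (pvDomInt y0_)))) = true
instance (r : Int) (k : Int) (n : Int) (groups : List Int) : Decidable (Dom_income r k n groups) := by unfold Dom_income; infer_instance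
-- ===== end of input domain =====

-- B replaces A's ride-by-ride O(r·n) simulation by memoizing each start index's
-- (earnings, next start) on first visit and batching the r rides over the detected
-- cycle in closed form (objective: faster).

-- ===== PORT A =====
-- A's inner 'while' loop: one boarding round starting with p people, queue position i,
-- c groups loaded.  The loop body runs at most n-1 times (c increases up to n), so
-- fuel n.toNat suffices; groups[(i+1)%n] is in range under Pre_income.
def incomeRide (k n : Int) (groups : List Int) : Nat → Int → Int → Int → Int × Int
  | 0, p, i, _ => (p, i)
  | fuel+1, p, i, c =>
    if p + PySem.List.pyGetD groups (PySem.Int.mod (i+1) n) 0 ≤ k ∧ c < n then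
      incomeRide k n groups fuel (p + PySem.List.pyGetD groups (PySem.Int.mod (i+1) n) 0)
        (PySem.Int.mod (i+1) n) (c+1)
    else (p, i)

def income (r : Int) (k : Int) (n : Int) (groups : List Int) : String :=
  PySem.Int.toStr
    ((PySem.List.pyRange 0 r 1).foldl
      (fun (st : Int × Int) _ =>
        let pr := incomeRide k n groups n.toNat (PySem.List.pyGetD groups st.2 0) st.2 1
        (st.1 + pr.1, PySem.Int.mod (pr.2 + 1) n))
      ((0 : Int), (0 : Int))).1

-- ===== PORT B =====
-- Source B's inner 'while' loop (same round simulation as A's, run once per distinct start).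
def incomeRideB (k n : Int) (groups : List Int) : Nat → Int → Int → Int → Int × Int
  | 0, p, i, _ => (p, i)
  | fuel+1, p, i, c =>
    if p + PySem.List.pyGetD groups (PySem.Int.mod (i+1) n) 0 ≤ k ∧ c < n then
      incomeRideB k n groups fuel (p + PySem.List.pyGetD groups (PySem.Int.mod (i+1) n) 0)
        (PySem.Int.mod (i+1) n) (c+1)
    else (p, i)

-- Source B's outer 'while first[cur] is None and len(pref)-1 < r' loop plus the closing
-- arithmetic.  Each iteration marks a fresh cell of 'first' (all cells lie in [0,n)),
-- so the loop runs at most n times and fuel n.toNat+1 suffices; the "" branches are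
-- unreachable under Pre_income (proved in cycle_correct below).
def incomeCycle (r k n : Int) (groups : List Int) :
    Nat → List (Option Int) → List Int → Int → String
  | 0, _, _, _ => ""
  | fuel+1, first, pref, cur =>
    if PySem.List.pyGetD first cur none = none ∧ (pref.length : Int) - 1 < r then
      let pr := incomeRideB k n groups n.toNat (PySem.List.pyGetD groups cur 0) cur 1
      incomeCycle r k n groups fuel
        (PySem.List.pySetD first cur (some ((pref.length : Int) - 1)))
        (pref ++ [PySem.List.pyGetD pref (-1) 0 + pr.1])
        (PySem.Int.mod (pr.2 + 1) n)
    else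
      if r ≤ (pref.length : Int) - 1 then PySem.Int.toStr (PySem.List.pyGetD pref r 0)
      else
        match PySem.List.pyGetD first cur none with
        | none => ""
        | some t =>
          let L : Int := (pref.length : Int) - 1
          let cyc := PySem.List.pyGetD pref L 0 - PySem.List.pyGetD pref t 0
          -- divmod(r - t, L - t): positive divisor, ported with floordiv/mod
          PySem.Int.toStr (PySem.Int.floordiv (r - t) (L - t) * cyc +
            PySem.List.pyGetD pref (t + PySem.Int.mod (r - t) (L - t)) 0)

def income_alt (r : Int) (k : Int) (n : Int) (groups : List Int) : String :=
  if r ≤ 0 then "0"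
  else incomeCycle r k n groups (n.toNat + 1) (List.replicate n.toNat none) [0] 0

-- ===== PRECONDITION & SPEC =====
-- Pre_income excludes (for r > 0) n ≤ 0, where A's '% n' raises ZeroDivisionError or
-- wraps indices negatively, and n > len(groups), where A's group indexing runs off the
-- list (raising IndexError for most r); see the cites for the excluded corners on
-- which A still returns.
def Pre_income (r : Int) (k : Int) (n : Int) (groups : List Int) : Prop :=
  r ≤ 0 ∨ (1 ≤ n ∧ n ≤ (groups.length : Int))
instance (r : Int) (k : Int) (n : Int) (groups : List Int) : Decidable (Pre_income r k n groups) := by unfold Pre_income; infer_instance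

def pvWitness_income : Int × Int × Int × List Int := (7, 6, 3, [1, 4, 2])

def Spec_income (r : Int) (k : Int) (n : Int) (groups : List Int) (out : String) : Prop := out = income_alt r k n groups
instance (r : Int) (k : Int) (n : Int) (groups : List Int) (out : String) : Decidable (Spec_income r k n groups out) := by unfold Spec_income; infer_instance

-- ===== CLAIM (what is proved, stated in full; the proofs are below) =====
def Claim_equal_income : Prop := ∀ (r : Int) (k : Int) (n : Int) (groups : List Int), Dom_income r k n groups → Pre_income r k n groups → Spec_income r k n groups (income r k n groups)

-- ===== LEMMAS AND PROOFS =====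

-- The two inner-loop helpers are the same function.
theorem rideB_eq_ride (k n : Int) (groups : List Int) :
    ∀ fuel p i c, incomeRideB k n groups fuel p i c = incomeRide k n groups fuel p i c := by
  intro fuel
  induction fuel with
  | zero => intro p i c; rfl
  | succ f ih =>
    intro p i c
    simp only [incomeRideB, incomeRide]
    split_ifs with h
    · exact ih _ _ _
    · rfl

-- Earnings and next start index of one boarding round started at queue position i.
def earnF (k n : Int) (groups : List Int) (i : Int) : Int :=
  (incomeRide k n groups n.toNat (PySem.List.pyGetD groups i 0) i 1).1

def nxtF (k n : Int) (groups : List Int) (i : Int) : Int :=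
  PySem.Int.mod ((incomeRide k n groups n.toNat (PySem.List.pyGetD groups i 0) i 1).2 + 1) n

-- The trajectory of start indices and the running total over the first m rounds.
def traj (k n : Int) (groups : List Int) : Nat → Int
  | 0 => 0
  | j+1 => nxtF k n groups (traj k n groups j)

def Ssum (k n : Int) (groups : List Int) : Nat → Int
  | 0 => 0
  | j+1 => Ssum k n groups j + earnF k n groups (traj k n groups j)

theorem traj_bounds (k n : Int) (groups : List Int) (hn : 1 ≤ n) :
    ∀ j, 0 ≤ traj k n groups j ∧ traj k n groups j < n := by
  intro j
  cases j with
  | zero => exact ⟨le_refl 0, by simp [traj]; omega⟩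
  | succ j =>
    exact ⟨PySem.Int.mod_nonneg _ (by omega), PySem.Int.mod_lt _ (by omega)⟩

-- A's outer fold computes the running total along the trajectory.
theorem foldA (k n : Int) (groups : List Int) :
    ∀ (l : List Int) (m0 : Int) (d : Nat),
      l.foldl (fun (st : Int × Int) _ =>
        let pr := incomeRide k n groups n.toNat (PySem.List.pyGetD groups st.2 0) st.2 1
        (st.1 + pr.1, PySem.Int.mod (pr.2 + 1) n)) (m0, traj k n groups d)
      = (m0 + (Ssum k n groups (d + l.length) - Ssum k n groups d), traj k n groups (d + l.length)) := by
  intro l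
  induction l with
  | nil => intro m0 d; simp
  | cons x xs ih =>
    intro m0 d
    have h1 : (fun (st : Int × Int) _ =>
        let pr := incomeRide k n groups n.toNat (PySem.List.pyGetD groups st.2 0) st.2 1
        (st.1 + pr.1, PySem.Int.mod (pr.2 + 1) n)) (m0, traj k n groups d) x
        = (m0 + earnF k n groups (traj k n groups d), traj k n groups (d+1)) := by
      simp [earnF, nxtF, traj]
    have hS : Ssum k n groups (d+1) = Ssum k n groups d + earnF k n groups (traj k n groups d) := rfl
    simp only [List.foldl_cons, h1, ih _ (d+1), List.length_cons]
    have e1 : d + (xs.length + 1) = d + 1 + xs.length := by omega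
    refine Prod.ext ?_ ?_
    · simp only [e1, hS]; ring
    · simp only [e1]

theorem income_eq_Ssum (r k n : Int) (groups : List Int) :
    income r k n groups = PySem.Int.toStr (Ssum k n groups r.toNat) := by
  unfold income
  have h := foldA k n groups (PySem.List.pyRange 0 r 1) 0 0
  simp only [traj] at h
  rw [h]
  simp [Ssum, PySem.List.length_pyRange_one]

-- B's table invariant for 'first' after d loop iterations.
def InvFirst (k n : Int) (groups : List Int) (d : Nat) (first : List (Option Int)) : Prop :=
  first.length = n.toNat ∧
  (∀ j, j < d → PySem.List.pyGetD first (traj k n groups j) none = some (j : Int)) ∧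
  (∀ i : Int, 0 ≤ i → i < n → (∀ j, j < d → traj k n groups j ≠ i) →
    PySem.List.pyGetD first i none = none)

-- Index lookup in the prefix table [f 0, …, f d].
theorem pref_get (f : Nat → Int) (d : Nat) (i : Int) (h0 : 0 ≤ i) (h1 : i < (d : Int) + 1) :
    PySem.List.pyGetD ((List.range (d+1)).map f) i 0 = f i.toNat := by
  rw [PySem.List.pyGetD_eq_getElem _ 0 h0 (by simp; omega)]
  simp

-- Once the trajectory repeats (traj d = traj j, j ≤ d), it is periodic from j on.
theorem traj_periodic (k n : Int) (groups : List Int) (j d : Nat) (hjd : j ≤ d)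
    (h : traj k n groups d = traj k n groups j) :
    ∀ a, traj k n groups (j + a + (d - j)) = traj k n groups (j + a) := by
  intro a
  induction a with
  | zero =>
    have e : j + 0 + (d - j) = d := by omega
    have e2 : j + 0 = j := rfl
    rw [e, e2, h]
  | succ a ih =>
    have e : j + (a+1) + (d - j) = (j + a + (d - j)) + 1 := by omega
    have e2 : j + (a+1) = (j + a) + 1 := by omega
    rw [e, e2]
    show nxtF k n groups (traj k n groups (j + a + (d - j))) = nxtF k n groups (traj k n groups (j + a))
    rw [ih]

theorem Ssum_shift (k n : Int) (groups : List Int) (j d : Nat) (hjd : j ≤ d)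
    (h : traj k n groups d = traj k n groups j) :
    ∀ a, Ssum k n groups (j + a + (d - j))
        = Ssum k n groups (j + a) + (Ssum k n groups d - Ssum k n groups j) := by
  intro a
  induction a with
  | zero =>
    have e : j + 0 + (d - j) = d := by omega
    have e2 : j + 0 = j := rfl
    rw [e, e2]; ring
  | succ a ih =>
    have e : j + (a+1) + (d - j) = (j + a + (d - j)) + 1 := by omega
    have e2 : j + (a+1) = (j + a) + 1 := by omega
    rw [e, e2]
    show Ssum k n groups (j + a + (d - j)) + earnF k n groups (traj k n groups (j + a + (d - j)))
        = Ssum k n groups (j + a) + earnF k n groups (traj k n groups (j + a)) + _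
    rw [ih, traj_periodic k n groups j d hjd h a]
    ring

theorem Ssum_batch (k n : Int) (groups : List Int) (j d : Nat) (hjd : j ≤ d)
    (h : traj k n groups d = traj k n groups j) :
    ∀ (q a : Nat), Ssum k n groups (j + a + q * (d - j))
        = Ssum k n groups (j + a) + (q : Int) * (Ssum k n groups d - Ssum k n groups j) := by
  intro q
  induction q with
  | zero => intro a; simp
  | succ q ih =>
    intro a
    have e : j + a + (q+1) * (d - j) = j + (a + q * (d - j)) + (d - j) := by ring
    rw [e, Ssum_shift k n groups j d hjd h (a + q * (d - j)),
      show j + (a + q * (d - j)) = j + a + q * (d - j) from by ring, ih a]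
    push_cast
    ring

-- At most n.toNat pairwise-distinct trajectory values fit in [0, n).
theorem traj_pigeonhole (k n : Int) (groups : List Int) (hn : 1 ≤ n) (d : Nat)
    (inj : ∀ j1 j2, j1 < d → j2 < d → traj k n groups j1 = traj k n groups j2 → j1 = j2) :
    d ≤ n.toNat := by
  have hcard := Finset.card_le_card_of_injOn (s := Finset.range d)
      (t := Finset.Ico (0 : Int) n) (fun j => traj k n groups j)
      (by
        intro j hj
        simp only [Finset.coe_range, Set.mem_Iio] at hj
        simp only [Finset.coe_Ico, Set.mem_Ico]
        exact traj_bounds k n groups hn j)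
      (by
        intro a ha b hb hab
        simp only [Finset.coe_range, Set.mem_Iio] at ha hb
        exact inj a b ha hb hab)
  simp only [Finset.card_range, Int.card_Ico] at hcard
  omega

-- Marking the current (fresh) trajectory cell preserves the table invariant.
theorem inv_step (k n : Int) (groups : List Int) (hn : 1 ≤ n) (d : Nat)
    (first : List (Option Int)) (hInv : InvFirst k n groups d first)
    (hfound : PySem.List.pyGetD first (traj k n groups d) none = none) :
    InvFirst k n groups (d+1)
      (PySem.List.pySetD first (traj k n groups d) (some (d : Int))) := by
  obtain ⟨hl, h2, h3⟩ := hInv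
  have hb := traj_bounds k n groups hn
  have hdn : (traj k n groups d).toNat < first.length := by
    have := hb d; omega
  have hcast : ((traj k n groups d).toNat : Int) = traj k n groups d :=
    Int.toNat_of_nonneg (hb d).1
  refine ⟨by rw [PySem.List.length_pySetD, hl], ?_, ?_⟩
  · intro j hj
    have hcj : ((traj k n groups j).toNat : Int) = traj k n groups j :=
      Int.toNat_of_nonneg (hb j).1
    rw [← hcast, ← hcj, PySem.List.pyGetD_pySetD_natCast first _ _ _ none hdn]
    by_cases hjd : j = d
    · subst hjd; rw [if_pos rfl]
    · have hne : traj k n groups j ≠ traj k n groups d := by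
        intro he
        rw [← he, h2 j (by omega)] at hfound
        exact Option.some_ne_none _ hfound
      rw [if_neg (fun he => hne (by rw [← hcj, ← hcast, he]))]
      rw [hcj]; exact h2 j (by omega)
  · intro i h0 hin hno
    have hci : (i.toNat : Int) = i := Int.toNat_of_nonneg h0
    rw [← hcast, ← hci, PySem.List.pyGetD_pySetD_natCast first _ _ _ none hdn]
    have hne : i ≠ traj k n groups d := fun he => (hno d (by omega)) he.symm
    rw [if_neg (by intro he; apply hne; rw [← hci, ← hcast, he])]
    rw [hci]
    exact h3 i h0 hin (fun j hj => hno j (by omega))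

theorem cycle_correct (r k n : Int) (groups : List Int) (hn : 1 ≤ n) (hr : 0 < r) :
    ∀ (fuel d : Nat) (first : List (Option Int)),
      InvFirst k n groups d first → (d : Int) ≤ r → n.toNat + 1 ≤ fuel + d →
      incomeCycle r k n groups fuel first ((List.range (d+1)).map (Ssum k n groups)) (traj k n groups d)
        = PySem.Int.toStr (Ssum k n groups r.toNat) := by
  intro fuel
  induction fuel with
  | zero =>
    intro d first hInv hdr hfuel
    exfalso
    have inj : ∀ j1 j2, j1 < d → j2 < d → traj k n groups j1 = traj k n groups j2 → j1 = j2 := by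
      intro j1 j2 h1 h2 he
      have e1 := hInv.2.1 j1 h1
      have e2 := hInv.2.1 j2 h2
      rw [he, e2] at e1
      have : (j2 : Int) = (j1 : Int) := by injection e1
      omega
    have := traj_pigeonhole k n groups hn d inj
    omega
  | succ fuel ih =>
    intro d first hInv hdr hfuel
    have hb := traj_bounds k n groups hn
    have hlen1 : (((List.range (d+1)).map (Ssum k n groups)).length : Int) - 1 = (d : Int) := by
      simp
    simp only [incomeCycle]
    by_cases hfound : PySem.List.pyGetD first (traj k n groups d) none = none
    · by_cases hdr2 : (d : Int) < r
      · rw [if_pos ⟨hfound, by rw [hlen1]; exact hdr2⟩]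
        have hsplit : (List.range (d+1)).map (Ssum k n groups)
            = (List.range d).map (Ssum k n groups) ++ [Ssum k n groups d] := by
          rw [List.range_succ, List.map_append]; rfl
        have hlast : PySem.List.pyGetD ((List.range (d+1)).map (Ssum k n groups)) (-1) 0
            = Ssum k n groups d := by
          rw [hsplit]; exact PySem.List.pyGetD_neg_one_append_singleton _ _ _
        have hride := rideB_eq_ride k n groups n.toNat
          (PySem.List.pyGetD groups (traj k n groups d) 0) (traj k n groups d) 1
        have hpref : (List.range (d+1)).map (Ssum k n groups)
              ++ [PySem.List.pyGetD ((List.range (d+1)).map (Ssum k n groups)) (-1) 0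
                  + (incomeRideB k n groups n.toNat
                      (PySem.List.pyGetD groups (traj k n groups d) 0) (traj k n groups d) 1).1]
            = (List.range (d+1+1)).map (Ssum k n groups) := by
          rw [hlast, hride]
          rw [List.range_succ (n := d+1), List.map_append]
          rfl
        have hcur : PySem.Int.mod ((incomeRideB k n groups n.toNat
              (PySem.List.pyGetD groups (traj k n groups d) 0) (traj k n groups d) 1).2 + 1) n
            = traj k n groups (d+1) := by
          rw [hride]; rfl
        rw [hlen1, hpref, hcur]
        exact ih (d+1) _ (inv_step k n groups hn d first hInv hfound) (by omega) (by omega)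
      · rw [if_neg (by rw [hlen1]; exact fun h => hdr2 h.2)]
        rw [if_pos (by rw [hlen1]; omega)]
        congr 1
        rw [pref_get (Ssum k n groups) d r (by omega) (by omega)]
    · obtain ⟨t, ht⟩ : ∃ t, PySem.List.pyGetD first (traj k n groups d) none = some t := by
        cases h2 : PySem.List.pyGetD first (traj k n groups d) none with
        | none => exact absurd h2 hfound
        | some t => exact ⟨t, rfl⟩
      obtain ⟨j, hj, hje⟩ : ∃ j, j < d ∧ traj k n groups j = traj k n groups d := by
        by_contra hno
        push Not at hno
        exact hfound (hInv.2.2 (traj k n groups d) (hb d).1 (hb d).2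
          (fun j hjd => hno j hjd))
      have htj : t = (j : Int) := by
        have h2 := hInv.2.1 j hj
        rw [hje, ht] at h2
        exact Option.some.inj h2
      rw [if_neg (fun h => hfound h.1)]
      by_cases hrd : r ≤ (d : Int)
      · rw [if_pos (by rw [hlen1]; exact hrd)]
        congr 1
        rw [pref_get (Ssum k n groups) d r (by omega) (by omega)]
      · rw [if_neg (by rw [hlen1]; exact hrd), ht, htj]
        simp only [hlen1]
        congr 1
        -- closed-form batch over the cycle [j, d)
        have hcl : (0 : Int) < (d : Int) - (j : Int) := by omega
        rw [PySem.Int.floordiv_eq_ediv_of_pos hcl, PySem.Int.mod_eq_emod_of_pos hcl]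
        set cl : Int := (d : Int) - (j : Int) with hcldef
        set q : Int := (r - (j : Int)) / cl with hqdef
        set m : Int := (r - (j : Int)) % cl with hmdef
        have hq0 : 0 ≤ q := Int.ediv_nonneg (by omega) (by omega)
        have hm0 : 0 ≤ m := Int.emod_nonneg _ (by omega)
        have hmlt : m < cl := Int.emod_lt_of_pos _ hcl
        have hqm : cl * q + m = r - (j : Int) := by rw [hqdef, hmdef]; exact Int.mul_ediv_add_emod _ _
        have hgj : PySem.List.pyGetD ((List.range (d+1)).map (Ssum k n groups)) (j : Int) 0
            = Ssum k n groups j := by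
          rw [pref_get (Ssum k n groups) d (j : Int) (by omega) (by omega)]
          simp
        have hgd : PySem.List.pyGetD ((List.range (d+1)).map (Ssum k n groups)) (d : Int) 0
            = Ssum k n groups d := by
          rw [pref_get (Ssum k n groups) d (d : Int) (by omega) (by omega)]
          simp
        have hgm : PySem.List.pyGetD ((List.range (d+1)).map (Ssum k n groups)) ((j : Int) + m) 0
            = Ssum k n groups (j + m.toNat) := by
          rw [pref_get (Ssum k n groups) d ((j : Int) + m) (by omega) (by omega)]
          congr 1
          omega
        rw [hgj, hgd, hgm]
        have hrtn : r.toNat = j + m.toNat + q.toNat * (d - j) := by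
          have hc : ((j + m.toNat + q.toNat * (d - j) : Nat) : Int) = r := by
            push_cast [Int.toNat_of_nonneg hq0, Int.toNat_of_nonneg hm0,
              Nat.cast_sub (le_of_lt hj)]
            linarith [hqm]
          rw [← hc, Int.toNat_natCast]
        rw [hrtn, Ssum_batch k n groups j d (by omega) hje.symm q.toNat m.toNat]
        rw [Int.toNat_of_nonneg hq0]
        ring


-- ===== VERDICT (by name: the statement is the Claim_ definition above) =====
theorem income_spec : Claim_equal_income := by
  intro r k n groups _ hpre
  unfold Spec_income income_alt
  rw [income_eq_Ssum]
  by_cases hr : r ≤ 0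
  · have : r.toNat = 0 := by omega
    simp [hr, this, Ssum]
    rfl
  · rcases hpre with h | ⟨hn, hlen⟩
    · omega
    · simp only [if_neg hr]
      have h0 : ((List.range 1).map (Ssum k n groups)) = [0] := by simp [Ssum]
      have hInv : InvFirst k n groups 0 (List.replicate n.toNat none) := by
        refine ⟨by simp, by intro j hj; omega, ?_⟩
        intro i h0i hin _
        by_cases hR : PySem.Raise.InRange (List.replicate n.toNat (none : Option Int)).length i
        · have := PySem.List.pyGetD_mem (List.replicate n.toNat (none : Option Int)) none hR
          exact List.eq_of_mem_replicate this
        · exact PySem.List.pyGetD_of_none _ _ _ ((PySem.List.pyGet?_eq_none_iff _ _).2 hR)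
      have h00 : traj k n groups 0 = 0 := rfl
      rw [← h0, ← h00, cycle_correct r k n groups hn (by omega) (n.toNat + 1) 0 _ hInv (by omega) (by omega)]
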